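-- pv_equiv track=rewrite | github.com/BaeInpyo/ProgrammingExercise | Chapter11_CombinationalSearch/Kakuro2/ygg_kakuro2.py | getMinCandi
-- ===== SOURCE A (Python) =====
-- def getMinCandi(val, numOfWhite):
--     if numOfWhite == 1:
--         return val
--     minLimit = numOfWhite
--     minBase = sum(range(1,numOfWhite))
--     for i in range(numOfWhite+1,10):
--         if minBase + i > val:
--             break
--         minLimit = i
--     return minLimit
-- ===== SOURCE B (Python) =====
-- def getMinCandi(val, numOfWhite):
--     if numOfWhite == 1:
--         return val
--     minBase = numOfWhite * (numOfWhite - 1) // 2 if numOfWhite > 1 else 0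
--     return max(numOfWhite, min(9, val - minBase))
-- ===== Notes on version B (the rewrite author's own statement) =====
-- stated objective: faster
-- what changed: Replaced the O(numOfWhite) range-sum and break-loop with the closed form minBase = numOfWhite*(numOfWhite-1)//2 and max(numOfWhite, min(9, val - minBase)).
import Mathlib
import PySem

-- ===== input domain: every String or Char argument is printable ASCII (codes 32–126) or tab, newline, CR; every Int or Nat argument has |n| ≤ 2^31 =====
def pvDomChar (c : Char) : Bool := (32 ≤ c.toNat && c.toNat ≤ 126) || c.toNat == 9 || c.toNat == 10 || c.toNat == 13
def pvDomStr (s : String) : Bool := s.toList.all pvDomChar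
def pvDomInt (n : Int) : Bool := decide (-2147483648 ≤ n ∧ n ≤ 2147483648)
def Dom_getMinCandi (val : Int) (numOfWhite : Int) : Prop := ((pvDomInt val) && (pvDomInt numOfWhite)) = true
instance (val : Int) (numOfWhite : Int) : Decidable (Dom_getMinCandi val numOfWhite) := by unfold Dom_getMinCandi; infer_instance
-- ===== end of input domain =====

-- B replaces A's range-sum and break-loop with a closed-form formula (objective: simpler).

-- ===== PORT A =====
-- sum(range(1, numOfWhite)): Python's range is lazy, so the sum is ported as a
-- counting loop accumulating i from 1 while i < n (exact for every Int n)
def getMinCandiSumGo (n : Int) (i : Int) (acc : Int) : Int :=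
  if i < n then getMinCandiSumGo n (i + 1) (acc + i) else acc
termination_by (n - i).toNat
decreasing_by omega

-- the for-loop over range(numOfWhite+1, 10) with break, carrying minLimit
def getMinCandiLoop (val minBase : Int) : List Int → Int → Int
  | [], minLimit => minLimit
  | i :: rest, minLimit =>
      if minBase + i > val then minLimit else getMinCandiLoop val minBase rest i

def getMinCandi (val : Int) (numOfWhite : Int) : Int :=
  if numOfWhite = 1 then val
  else
    let minLimit := numOfWhite
    let minBase := getMinCandiSumGo numOfWhite 1 0
    getMinCandiLoop val minBase (PySem.List.pyRange (numOfWhite + 1) 10 1) minLimit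

-- ===== PORT B =====
def getMinCandi_alt (val : Int) (numOfWhite : Int) : Int :=
  if numOfWhite = 1 then val
  else
    let minBase := if numOfWhite > 1 then PySem.Int.floordiv (numOfWhite * (numOfWhite - 1)) 2 else 0
    max numOfWhite (min 9 (val - minBase))

-- ===== PRECONDITION & SPEC =====
def Spec_getMinCandi (val : Int) (numOfWhite : Int) (out : Int) : Prop := out = getMinCandi_alt val numOfWhite
instance (val : Int) (numOfWhite : Int) (out : Int) : Decidable (Spec_getMinCandi val numOfWhite out) := by unfold Spec_getMinCandi; infer_instance

-- ===== CLAIM (what is proved, stated in full; the proofs are below) =====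
def Claim_equal_getMinCandi : Prop := ∀ (val : Int) (numOfWhite : Int), Dom_getMinCandi val numOfWhite → Spec_getMinCandi val numOfWhite (getMinCandi val numOfWhite)

-- ===== LEMMAS AND PROOFS =====

-- closed form of the counting-loop sum: 2 * go n i acc = 2*acc + sum of [i..n-1] doubled
theorem sumGo_char (n : Int) : ∀ (k : Nat) (i acc : Int), (n - i).toNat = k →
    2 * getMinCandiSumGo n i acc = 2 * acc + (if i < n then (n - i) * (n + i - 1) else 0) := by
  intro k
  induction k with
  | zero =>
      intro i acc h
      rw [getMinCandiSumGo]
      rw [if_neg (by omega), if_neg (by omega)]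
      ring
  | succ k ih =>
      intro i acc h
      have hi : i < n := by omega
      rw [getMinCandiSumGo, if_pos hi, if_pos hi, ih (i + 1) (acc + i) (by omega)]
      by_cases h2 : i + 1 < n
      · rw [if_pos h2]
        ring
      · rw [if_neg h2]
        have hn : n = i + 1 := by omega
        subst hn
        ring

-- characterisation of A's break-loop from start index a
theorem getMinCandiLoop_char (val mB : Int) : ∀ (k : Nat) (a mL : Int), (10 - a).toNat = k →
    getMinCandiLoop val mB (PySem.List.pyRange a 10 1) mL =
      if a ≤ 9 ∧ mB + a ≤ val then min 9 (val - mB) else mL := by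
  intro k
  induction k with
  | zero =>
      intro a mL h
      rw [PySem.List.pyRange_one_eq_nil (by omega)]
      simp only [getMinCandiLoop]
      split_ifs with hc
      · omega
      · rfl
  | succ k ih =>
      intro a mL h
      have ha : a < 10 := by omega
      rw [PySem.List.pyRange_one_cons ha]
      simp only [getMinCandiLoop]
      by_cases hc : mB + a > val
      · rw [if_pos hc]
        split_ifs with h2
        · omega
        · rfl
      · rw [if_neg hc, ih (a + 1) a (by omega)]
        split_ifs with h1 h2 h2 <;> omega

-- ===== VERDICT (by name: the statement is the Claim_ definition above) =====
theorem getMinCandi_spec : Claim_equal_getMinCandi := by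
  intro val n _
  unfold Spec_getMinCandi getMinCandi getMinCandi_alt
  by_cases h1 : n = 1
  · simp [h1]
  · rw [if_neg h1, if_neg h1]
    dsimp only
    set M := getMinCandiSumGo n 1 0 with hM
    have hsum := sumGo_char n (n - 1).toNat 1 0 rfl
    rw [← hM] at hsum
    have hloop := getMinCandiLoop_char val M (10 - (n + 1)).toNat (n + 1) n rfl
    rw [hloop]
    by_cases hn2 : n > 1
    · -- minBase agrees: floordiv (n*(n-1)) 2 = M, since 2*M = (n-1)*n
      rw [if_pos (by omega : (1:Int) < n)] at hsum
      have hfd : PySem.Int.floordiv (n * (n - 1)) 2 = M := by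
        rw [PySem.Int.floordiv_eq_iff_of_pos (by omega)]
        have h2 : 2 * M = n * (n - 1) := by rw [hsum]; ring
        omega
      rw [if_pos hn2, hfd]
      clear hsum
      split_ifs with h <;> omega
    · -- n ≤ 0 here: the range sum is empty, M = 0
      have hM0 : M = 0 := by
        rw [if_neg (by omega : ¬ (1:Int) < n)] at hsum
        omega
      rw [if_neg hn2]
      rw [hM0] at *
      split_ifs with h <;> omega
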